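-- pv_equiv track=rewrite | github.com/pillemer/Ask | ask.py | get_root_from_file_path
-- ===== SOURCE A (Python) =====
-- def get_root_from_file_path(file_path):
-- 	final_path = ''
-- 	adder = False
--
-- 	for char in file_path[::-1]:
-- 		if adder:
-- 			final_path += char
-- 		elif char == '/':
-- 			adder = True
--
-- 	if not file_path:
-- 		final_path = file_path
--
-- 	return final_path[::-1]
-- ===== SOURCE B (Python) =====
-- def get_root_from_file_path(file_path):
-- 	idx = file_path.rfind('/')
-- 	if idx == -1:
-- 		return ''
-- 	return file_path[:idx]
-- ===== Notes on version B (the rewrite author's own statement) =====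
-- stated objective: faster
-- what changed: Replaces the double string reversal and character-by-character accumulation loop with a single rfind of the last separator followed by one slice (empty string when no separator, matching A).
import Mathlib
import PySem

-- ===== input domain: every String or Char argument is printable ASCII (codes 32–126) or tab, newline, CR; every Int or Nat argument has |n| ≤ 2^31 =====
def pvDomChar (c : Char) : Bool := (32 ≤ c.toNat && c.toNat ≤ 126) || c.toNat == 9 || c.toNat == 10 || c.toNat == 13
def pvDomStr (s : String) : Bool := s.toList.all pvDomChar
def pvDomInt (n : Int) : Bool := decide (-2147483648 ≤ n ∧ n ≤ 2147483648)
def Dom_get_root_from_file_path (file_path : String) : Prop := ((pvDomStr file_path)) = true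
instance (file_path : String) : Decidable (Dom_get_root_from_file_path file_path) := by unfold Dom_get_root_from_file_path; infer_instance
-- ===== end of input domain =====

-- B replaces A's double reversal and char-accumulation loop by rfind of the last '/' plus one slice; objective: simpler.

-- ===== PORT A =====
-- loop body: 'if adder: final_path += char / elif char == '/': adder = True'
def grStep (st : List Char × Bool) (c : Char) : List Char × Bool :=
  if st.2 then (st.1 ++ [c], st.2) else if c = '/' then (st.1, true) else st

def get_root_from_file_path (file_path : String) : String :=
  -- for char in file_path[::-1]
  let rev := (PySem.Str.slice? file_path none none (-1)).getD ""
  let st := rev.toList.foldl grStep ([], false)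
  -- if not file_path: final_path = file_path
  let final_path := if file_path = "" then file_path.toList else st.1
  -- return final_path[::-1]
  String.ofList ((PySem.List.slice? final_path none none (-1)).getD [])

-- ===== PORT B =====
def get_root_from_file_path_alt (file_path : String) : String :=
  let idx := PySem.Str.rfind file_path "/"
  if idx = -1 then "" else PySem.Str.slice file_path none (some idx)

-- ===== PRECONDITION & SPEC =====
def Spec_get_root_from_file_path (file_path : String) (out : String) : Prop := out = get_root_from_file_path_alt file_path
instance (file_path : String) (out : String) : Decidable (Spec_get_root_from_file_path file_path out) := by unfold Spec_get_root_from_file_path; infer_instance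

-- ===== CLAIM (what is proved, stated in full; the proofs are below) =====
def Claim_equal_get_root_from_file_path : Prop := ∀ (file_path : String), Dom_get_root_from_file_path file_path → Spec_get_root_from_file_path file_path (get_root_from_file_path file_path)

-- ===== LEMMAS AND PROOFS =====

-- list-level value of A's loop + final reversal
def faList (l : List Char) : List Char := (l.reverse.foldl grStep ([], false)).1.reverse

-- list-level value of B
def fbList (l : List Char) : List Char :=
  let idx := PySem.Chars.rfind l ['/']
  if idx = -1 then [] else PySem.List.slice l none (some idx)

-- one-step equations for PySem.Chars.rfind.go
theorem go_zero (l sub : List Char) :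
    PySem.Chars.rfind.go l sub 0 = if sub.isPrefixOf l then 0 else -1 := by
  simp [PySem.Chars.rfind.go]

theorem go_succ (l sub : List Char) (j : Nat) :
    PySem.Chars.rfind.go l sub (j + 1) =
      if sub.isPrefixOf (l.drop (j + 1)) then ((j : Int) + 1) else PySem.Chars.rfind.go l sub j := by
  simp [PySem.Chars.rfind.go]

theorem foldl_grStep_true (r acc : List Char) :
    r.foldl grStep (acc, true) = (acc ++ r, true) := by
  induction r generalizing acc with
  | nil => simp
  | cons c t ih => simp [List.foldl_cons, grStep, ih]

theorem faList_append (t : List Char) (c : Char) :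
    faList (t ++ [c]) = if c = '/' then t else faList t := by
  unfold faList
  simp only [List.reverse_append, List.reverse_singleton, List.singleton_append, List.foldl_cons]
  by_cases hc : c = '/'
  · have h1 : grStep ([], false) c = ([], true) := by simp [grStep, hc]
    rw [h1, foldl_grStep_true]
    simp [hc]
  · have h1 : grStep ([], false) c = ([], false) := by simp [grStep, hc]
    rw [h1]
    simp [hc]

theorem go_bounds (l sub : List Char) (n : Nat) :
    -1 ≤ PySem.Chars.rfind.go l sub n ∧ PySem.Chars.rfind.go l sub n ≤ (n : Int) := by
  induction n with
  | zero => rw [go_zero]; split <;> simp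
  | succ j ih => rw [go_succ]; split <;> omega

theorem prefix_slash_append (l : List Char) (c : Char) (hl : l ≠ []) :
    (['/'].isPrefixOf (l ++ [c])) = (['/'].isPrefixOf l) := by
  cases l with
  | nil => exact absurd rfl hl
  | cons h t => simp [List.isPrefixOf]

theorem go_append_ne (t : List Char) (c : Char) (hc : c ≠ '/') :
    ∀ j, j ≤ t.length → PySem.Chars.rfind.go (t ++ [c]) ['/'] j = PySem.Chars.rfind.go t ['/'] j := by
  intro j
  induction j with
  | zero =>
    intro _
    rw [go_zero, go_zero]
    cases t with
    | nil => simp [List.isPrefixOf, Ne.symm hc]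
    | cons h t' => simp [List.isPrefixOf]
  | succ j ih =>
    intro hj
    rw [go_succ, go_succ]
    rcases Nat.lt_or_ge (j + 1) t.length with h | h
    · rw [List.drop_append_of_le_length (by omega)]
      have hne : t.drop (j + 1) ≠ [] := by
        simp [List.drop_eq_nil_iff]; omega
      rw [prefix_slash_append _ _ hne]
      split_ifs
      · rfl
      · exact ih (by omega)
    · have hlen : t.length = j + 1 := le_antisymm h hj
      have h1 : (t ++ [c]).drop (j + 1) = [c] := by
        rw [show j + 1 = t.length from hlen.symm]; simp
      have h2 : t.drop (j + 1) = ([] : List Char) := by simp [hlen]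
      have hb1 : (['/'].isPrefixOf [c]) = false := by simp [List.isPrefixOf, Ne.symm hc]
      have hb2 : (['/'].isPrefixOf ([] : List Char)) = false := by simp [List.isPrefixOf]
      rw [h1, h2, hb1, hb2]
      simp only [Bool.false_eq_true, if_false]
      exact ih (by omega)

theorem rfind_append (t : List Char) (c : Char) :
    PySem.Chars.rfind (t ++ [c]) ['/'] =
      if c = '/' then (t.length : Int) else PySem.Chars.rfind t ['/'] := by
  unfold PySem.Chars.rfind
  have hlen : (t ++ [c]).length = t.length + 1 := by simp
  rw [hlen, go_succ]
  have hdropall : (t ++ [c]).drop (t.length + 1) = ([] : List Char) := by simp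
  rw [hdropall]
  simp only [List.isPrefixOf, Bool.false_eq_true, if_false]
  by_cases hc : c = '/'
  · -- position t.length holds the '/'
    cases ht : t.length with
    | zero =>
      have : t = ([] : List Char) := List.eq_nil_of_length_eq_zero ht
      subst this
      rw [go_zero]
      simp [hc, List.isPrefixOf]
    | succ m =>
      rw [go_succ]
      have : (t ++ [c]).drop (m + 1) = [c] := by
        rw [show m + 1 = t.length from ht.symm]; simp
      rw [this]
      simp [hc, List.isPrefixOf]
  · -- c ≠ '/' : same as the search in t
    rw [go_append_ne t c hc t.length le_rfl]
    simp [hc]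

theorem fa_eq_fb (l : List Char) : faList l = fbList l := by
  induction l using List.reverseRecOn with
  | nil =>
    simp only [faList, fbList, PySem.Chars.rfind]
    rw [show ([] : List Char).length = 0 from rfl, go_zero]
    simp [List.isPrefixOf]
  | append_singleton t c ih =>
    rw [faList_append, fbList, rfind_append]
    by_cases hc : c = '/'
    · simp only [hc, if_true]
      have hne : ((t.length : Int)) ≠ -1 := by omega
      simp only [hne, if_false]
      rw [PySem.List.slice_to_natCast]
      rw [List.take_append_of_le_length le_rfl]
      simp
    · simp only [hc, if_false]
      rw [ih, fbList]
      by_cases h1 : PySem.Chars.rfind t ['/'] = -1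
      · simp [h1]
      · simp only [h1, if_false]
        have hb := go_bounds t ['/'] t.length
        unfold PySem.Chars.rfind at h1 ⊢ hb
        set idx := PySem.Chars.rfind.go t ['/'] t.length with hidx
        have h0 : (0 : Int) ≤ idx := by omega
        rw [PySem.List.slice_to _ h0, PySem.List.slice_to _ h0]
        have hle : idx.toNat ≤ t.length := by omega
        rw [List.take_append_of_le_length hle]

theorem A_eq_fa (s : String) : get_root_from_file_path s = String.ofList (faList s.toList) := by
  unfold get_root_from_file_path faList
  rw [PySem.Str.slice?_none_none_neg_one]
  simp only [Option.getD_some]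
  rw [PySem.List.slice?_none_none_neg_one]
  by_cases hs : s = ""
  · subst hs; rfl
  · simp [hs]

theorem B_eq_fb (s : String) : get_root_from_file_path_alt s = String.ofList (fbList s.toList) := by
  unfold get_root_from_file_path_alt fbList
  simp only [PySem.Str.rfind]
  rw [show ("/" : String).toList = ['/'] from rfl]
  by_cases h : PySem.Chars.rfind s.toList ['/'] = -1
  · simp [h]
  · simp only [h, if_false]
    apply String.ext
    rw [PySem.Str.toList_slice, PySem.Chars.slice_eq_listSlice]
    simp

-- ===== VERDICT (by name: the statement is the Claim_ definition above) =====
theorem get_root_from_file_path_spec : Claim_equal_get_root_from_file_path := by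
  intro s _
  unfold Spec_get_root_from_file_path
  rw [A_eq_fa, B_eq_fb, fa_eq_fb]
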